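-- pv_equiv track=rewrite | github.com/Purdue-Artificial-Intelligence-in-Music/Evaluator-code | src/score/AudioThreadTest.py | get_durations
-- ===== SOURCE A (Python) =====
-- def get_durations(onset_times, end_time):
--     durs = []
--     for i in range(len(onset_times)):
--         if i < len(onset_times) - 1:
--             durs.append(onset_times[i + 1] - onset_times[i])
--         else:
--             durs.append(end_time - onset_times[i])
--     return durs
-- ===== SOURCE B (Python) =====
-- def get_durations(onset_times, end_time):
--     # Walk the onsets back-to-front, carrying the upcoming boundary time:
--     # the boundary starts as end_time and becomes the current onset afterwards.
--     durs = []
--     bound = end_time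
--     for t in reversed(onset_times):
--         durs.append(bound - t)
--         bound = t
--     durs.reverse()
--     return durs
-- ===== Notes on version B (the rewrite author's own statement) =====
-- stated objective: alternative
-- what changed: B traverses the onsets in reverse carrying the upcoming boundary (initially end_time) in an accumulator, building the result back-to-front and reversing it, instead of A's forward index loop with a last-vs-non-last branch and i+1 index lookups.
import Mathlib
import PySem

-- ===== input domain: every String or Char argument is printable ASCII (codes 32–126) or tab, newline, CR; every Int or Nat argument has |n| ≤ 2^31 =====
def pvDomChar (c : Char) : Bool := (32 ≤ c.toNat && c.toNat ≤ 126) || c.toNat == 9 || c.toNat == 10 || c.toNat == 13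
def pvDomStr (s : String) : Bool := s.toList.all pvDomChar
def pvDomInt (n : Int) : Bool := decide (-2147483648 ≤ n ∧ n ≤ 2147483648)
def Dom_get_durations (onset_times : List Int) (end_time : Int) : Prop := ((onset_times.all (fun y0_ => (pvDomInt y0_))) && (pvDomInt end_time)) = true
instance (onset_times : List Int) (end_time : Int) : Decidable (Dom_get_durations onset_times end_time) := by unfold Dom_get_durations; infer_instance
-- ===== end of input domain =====

-- ===== PORT A =====
-- B walks the onsets in reverse carrying the upcoming boundary (initially end_time)
-- in an accumulator, building the result back-to-front, instead of A's forward
-- index loop with a last-vs-non-last branch (objective: alternative).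
def get_durations (onset_times : List Int) (end_time : Int) : List Int :=
  (PySem.List.pyRange 0 (onset_times.length : Int) 1).foldl (fun durs i =>
    if i < (onset_times.length : Int) - 1 then
      durs ++ [PySem.List.pyGetD onset_times (i + 1) 0 - PySem.List.pyGetD onset_times i 0]
    else
      durs ++ [end_time - PySem.List.pyGetD onset_times i 0]) []

-- ===== PORT B =====
def get_durations_alt (onset_times : List Int) (end_time : Int) : List Int :=
  let st := onset_times.reverse.foldl
    (fun (p : List Int × Int) t => (p.1 ++ [p.2 - t], t)) ([], end_time)
  st.1.reverse

-- ===== PRECONDITION & SPEC =====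
def Spec_get_durations (onset_times : List Int) (end_time : Int) (out : List Int) : Prop := out = get_durations_alt onset_times end_time
instance (onset_times : List Int) (end_time : Int) (out : List Int) : Decidable (Spec_get_durations onset_times end_time out) := by unfold Spec_get_durations; infer_instance

-- ===== CLAIM (what is proved, stated in full; the proofs are below) =====
def Claim_equal_get_durations : Prop := ∀ (onset_times : List Int) (end_time : Int), Dom_get_durations onset_times end_time → Spec_get_durations onset_times end_time (get_durations onset_times end_time)

-- ===== LEMMAS AND PROOFS =====

-- common characterisation: pairwise differences of adjacent points of xs ++ [e]
def pvPair (xs : List Int) (e : Int) : List Int :=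
  List.zipWith (fun a b => b - a) (xs ++ [e]) ((xs ++ [e]).drop 1)

theorem pvPair_cons (x : Int) (t : List Int) (e : Int) :
    pvPair (x :: t) e = ((t ++ [e]).headI - x) :: pvPair t e := by
  cases t <;> simp [pvPair, List.headI]

theorem get_durations_eq_map (xs : List Int) (e : Int) :
    get_durations xs e = (PySem.List.pyRange 0 (xs.length : Int) 1).map
      (fun i => if i < (xs.length : Int) - 1 then
          PySem.List.pyGetD xs (i + 1) 0 - PySem.List.pyGetD xs i 0
        else e - PySem.List.pyGetD xs i 0) := by
  unfold get_durations
  have h : (fun (durs : List Int) (i : Int) =>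
      if i < (xs.length : Int) - 1 then
        durs ++ [PySem.List.pyGetD xs (i + 1) 0 - PySem.List.pyGetD xs i 0]
      else durs ++ [e - PySem.List.pyGetD xs i 0])
      = (fun durs i => durs ++ [if i < (xs.length : Int) - 1 then
          PySem.List.pyGetD xs (i + 1) 0 - PySem.List.pyGetD xs i 0
        else e - PySem.List.pyGetD xs i 0]) := by
    funext durs i; split <;> rfl
  rw [h, PySem.List.foldl_append_singleton_eq_map, List.nil_append]

theorem a_eq_pvPair (xs : List Int) (e : Int) : get_durations xs e = pvPair xs e := by
  rw [get_durations_eq_map]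
  show _ = List.zipWith (fun a b => b - a) (xs ++ [e]) ((xs ++ [e]).drop 1)
  apply List.ext_getElem
  · simp [PySem.List.length_pyRange_one]
  · intro k h1 h2
    simp only [List.length_map, PySem.List.length_pyRange_one] at h1
    simp only [List.length_zipWith, List.length_drop, List.length_append] at h2
    have hk : k < xs.length := by omega
    simp only [List.getElem_map, PySem.List.getElem_pyRange_one, zero_add]
    have hpts : ∀ (j : Nat) (hj : j < xs.length), (xs ++ [e])[j]'(by simp; omega) = xs[j] := by
      intro j hj; rw [List.getElem_append_left hj]
    simp only [List.getElem_zipWith, List.getElem_drop]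
    by_cases hc : (k : Int) < (xs.length : Int) - 1
    · rw [if_pos hc]
      have hk1 : k + 1 < xs.length := by omega
      rw [PySem.List.pyGetD_eq_getElem xs 0 (by omega) (by omega),
          PySem.List.pyGetD_eq_getElem xs 0 (by omega) (by omega)]
      rw [hpts _ hk]
      have : (xs ++ [e])[1 + k]'(by simp; omega) = xs[1 + k]'(by omega) :=
        hpts (1 + k) (by omega)
      rw [this]
      congr 2; omega
    · rw [if_neg hc]
      rw [PySem.List.pyGetD_eq_getElem xs 0 (by omega) (by omega)]
      rw [hpts _ hk]
      have : (xs ++ [e])[1 + k]'(by simp; omega) = e := by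
        rw [List.getElem_append_right (by omega)]
        simp
      rw [this]
      congr 1

theorem b_fold_eq (xs : List Int) (acc : List Int) (b : Int) :
    xs.reverse.foldl (fun (p : List Int × Int) t => (p.1 ++ [p.2 - t], t)) (acc, b)
      = (acc ++ (pvPair xs b).reverse, (xs ++ [b]).headI) := by
  induction xs generalizing acc b with
  | nil => simp [pvPair, List.headI]
  | cons x t ih =>
    simp only [List.reverse_cons, List.foldl_append, ih, List.foldl_cons, List.foldl_nil]
    rw [pvPair_cons]
    simp [List.headI]

theorem b_eq_pvPair (xs : List Int) (e : Int) : get_durations_alt xs e = pvPair xs e := by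
  unfold get_durations_alt
  rw [b_fold_eq]
  simp

-- ===== VERDICT (by name: the statement is the Claim_ definition above) =====
theorem get_durations_spec : Claim_equal_get_durations := by
  intro xs e _
  show get_durations xs e = get_durations_alt xs e
  rw [a_eq_pvPair, b_eq_pvPair]
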